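-- pv_equiv track=rewrite | github.com/gabeLin300/trace-code | trace_code/tools/executor.py | _extract_langchain_query
-- ===== SOURCE A (Python) =====
-- def _extract_langchain_query(text: str) -> str:
--     lowered = text.lower()
--     for prefix in ("search langchain docs", "query langchain docs", "find in langchain docs"):
--         if lowered.startswith(prefix):
--             tail = text[len(prefix) :].strip()
--             if tail.lower().startswith("for "):
--                 tail = tail[4:].strip()
--             return tail
--     marker = "langchain docs"
--     if marker in lowered:
--         idx = lowered.find(marker) + len(marker)
--         tail = text[idx:].strip()
--         if tail.lower().startswith("for "):
--             tail = tail[4:].strip()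
--         return tail
--     return ""
-- ===== SOURCE B (Python) =====
-- def _extract_langchain_query(text: str) -> str:
--     # Every recognised prefix ends in "langchain docs", so a single marker search
--     # lands at the same offset the prefix loop would: one pass suffices.
--     marker = "langchain docs"
--     idx = text.lower().find(marker)
--     if idx == -1:
--         return ""
--     tail = text[idx + len(marker):].strip()
--     if tail.lower().startswith("for "):
--         tail = tail[4:].strip()
--     return tail
-- ===== Notes on version B (the rewrite author's own statement) =====
-- stated objective: simpler
-- what changed: Dropped the three-prefix startswith loop entirely: since every prefix ends in 'langchain docs', a single find of that marker yields the same cut point, so B is one substring search plus the shared tail-stripping.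
import Mathlib
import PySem

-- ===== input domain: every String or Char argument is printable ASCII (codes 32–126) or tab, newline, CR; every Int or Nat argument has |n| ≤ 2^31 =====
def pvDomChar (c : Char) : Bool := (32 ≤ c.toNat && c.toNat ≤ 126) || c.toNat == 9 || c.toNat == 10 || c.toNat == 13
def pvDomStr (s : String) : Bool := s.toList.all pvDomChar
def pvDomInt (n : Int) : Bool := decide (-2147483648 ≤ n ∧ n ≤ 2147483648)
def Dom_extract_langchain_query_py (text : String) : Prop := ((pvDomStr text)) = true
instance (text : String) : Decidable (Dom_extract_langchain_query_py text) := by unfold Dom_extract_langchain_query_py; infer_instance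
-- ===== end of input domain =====

-- B replaces A's three-prefix startswith loop by a single search for the marker
-- "langchain docs" (every prefix ends in it, so the cut point is the same): simpler.

-- ===== PORT A =====
def pvMarker : List Char := "langchain docs".toList

-- the shared "strip a leading 'for '" post-processing of the tail
def pvStripForA (tail : List Char) : List Char :=
  if PySem.Chars.startswith (PySem.Chars.lower tail) "for ".toList then
    PySem.Chars.strip (PySem.List.slice tail (some 4) none)
  else tail

-- the 'for prefix in (...)' loop: first matching prefix wins, none = fall through
def pvLoopA (t lowered : List Char) : List (List Char) → Option (List Char)
  | [] => none
  | p :: ps =>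
    if PySem.Chars.startswith lowered p then
      some (pvStripForA (PySem.Chars.strip (PySem.List.slice t (some (p.length : Int)) none)))
    else pvLoopA t lowered ps

def pvCoreA (t : List Char) : List Char :=
  match pvLoopA t (PySem.Chars.lower t)
      ["search langchain docs".toList, "query langchain docs".toList,
       "find in langchain docs".toList] with
  | some r => r
  | none =>
    if PySem.Chars.isIn pvMarker (PySem.Chars.lower t) then
      pvStripForA (PySem.Chars.strip (PySem.List.slice t
        (some (PySem.Chars.find (PySem.Chars.lower t) pvMarker + (pvMarker.length : Int))) none))
    else []

def extract_langchain_query_py (text : String) : String :=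
  String.ofList (pvCoreA text.toList)

-- ===== PORT B =====
def pvStripForB (tail : List Char) : List Char :=
  if PySem.Chars.startswith (PySem.Chars.lower tail) "for ".toList then
    PySem.Chars.strip (PySem.List.slice tail (some 4) none)
  else tail

def pvCoreB (t : List Char) : List Char :=
  if PySem.Chars.find (PySem.Chars.lower t) pvMarker = -1 then []
  else
    pvStripForB (PySem.Chars.strip (PySem.List.slice t
      (some (PySem.Chars.find (PySem.Chars.lower t) pvMarker + (pvMarker.length : Int))) none))

def extract_langchain_query_py_alt (text : String) : String :=
  String.ofList (pvCoreB text.toList)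

-- ===== PRECONDITION & SPEC =====
def Spec_extract_langchain_query_py (text : String) (out : String) : Prop := out = extract_langchain_query_py_alt text
instance (text : String) (out : String) : Decidable (Spec_extract_langchain_query_py text out) := by unfold Spec_extract_langchain_query_py; infer_instance

-- ===== CLAIM (what is proved, stated in full; the proofs are below) =====
def Claim_equal_extract_langchain_query_py : Prop := ∀ (text : String), Dom_extract_langchain_query_py text → Spec_extract_langchain_query_py text (extract_langchain_query_py text)

-- ===== LEMMAS AND PROOFS =====

theorem pvStripFor_eq (x : List Char) : pvStripForB x = pvStripForA x := rfl

-- if the marker sits at position k of p ending exactly at p's end, and occurs nowhere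
-- earlier inside p, then the first occurrence of the marker in p ++ rest is at k
theorem pv_find_append (p rest : List Char) (k : Nat)
    (hplen : p.length = k + 14)
    (hdrop : p.drop k = pvMarker)
    (hno : ∀ i : Nat, i < k → (p.drop i).take 14 ≠ pvMarker) :
    PySem.Chars.find (p ++ rest) pvMarker = (k : Int) := by
  have hmlen : pvMarker.length = 14 := by decide
  have hkle : k ≤ p.length := by omega
  have hdropk : (p ++ rest).drop k = pvMarker ++ rest := by
    rw [List.drop_append_of_le_length hkle, hdrop]
  have hatk : pvMarker <+: (p ++ rest).drop k := by
    rw [hdropk]; exact List.prefix_append _ _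
  have hinf : pvMarker <:+: p ++ rest := by
    refine ⟨(p ++ rest).take k, rest, ?_⟩
    have := List.take_append_drop k (p ++ rest)
    rw [hdropk] at this
    simpa using this
  have hnn : 0 ≤ PySem.Chars.find (p ++ rest) pvMarker :=
    (PySem.Chars.find_nonneg_iff _ _).mpr hinf
  obtain ⟨hpre, hmin⟩ := PySem.Chars.find_spec hnn
  have hfk : (PySem.Chars.find (p ++ rest) pvMarker).toNat = k := by
    set f := (PySem.Chars.find (p ++ rest) pvMarker).toNat with hf
    by_contra hne
    rcases Nat.lt_or_ge f k with hlt | hge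
    · -- an occurrence strictly before k would lie wholly inside p
      have hfle : f ≤ p.length := by omega
      have hdropf : (p ++ rest).drop f = p.drop f ++ rest :=
        List.drop_append_of_le_length hfle
      rw [hdropf] at hpre
      have h14 : 14 ≤ (p.drop f).length := by
        rw [List.length_drop]; omega
      have := List.prefix_iff_eq_take.mp hpre
      rw [hmlen, List.take_append_of_le_length h14] at this
      exact hno f hlt this.symm
    · have hkf : k < f := lt_of_le_of_ne (by omega) (by omega)
      exact hmin k hkf hatk
  omega

-- a matched lowered prefix pins down B's whole computation to A's branch result
theorem pv_case_eq (t : List Char) (p : List Char) (k : Nat)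
    (hplen : p.length = k + 14)
    (hdrop : p.drop k = pvMarker)
    (hno : ∀ i : Nat, i < k → (p.drop i).take 14 ≠ pvMarker)
    (hsw : PySem.Chars.startswith (PySem.Chars.lower t) p = true) :
    pvCoreB t = pvStripForA (PySem.Chars.strip (PySem.List.slice t (some (p.length : Int)) none)) := by
  obtain ⟨rest, hL⟩ := (PySem.Chars.startswith_iff _ _).mp hsw
  have hfind : PySem.Chars.find (PySem.Chars.lower t) pvMarker = (k : Int) := by
    rw [← hL]; exact pv_find_append p rest k hplen hdrop hno
  have hne : (k : Int) ≠ -1 := by omega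
  have harg : (k : Int) + (pvMarker.length : Int) = (p.length : Int) := by
    have hm : pvMarker.length = 14 := by decide
    rw [hm, hplen]; push_cast; ring
  rw [pvCoreB, hfind, if_neg hne, pvStripFor_eq, harg]

-- ===== VERDICT (by name: the statement is the Claim_ definition above) =====
theorem extract_langchain_query_py_spec : Claim_equal_extract_langchain_query_py := by
  intro text _
  show extract_langchain_query_py text = extract_langchain_query_py_alt text
  rw [extract_langchain_query_py, extract_langchain_query_py_alt]
  congr 1
  set t := text.toList with ht
  by_cases h1 : PySem.Chars.startswith (PySem.Chars.lower t) "search langchain docs".toList = true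
  · rw [show pvCoreA t = pvStripForA (PySem.Chars.strip (PySem.List.slice t (some (("search langchain docs".toList.length : Nat) : Int)) none)) from by
      simp only [pvCoreA, pvLoopA, h1]; simp]
    exact (pv_case_eq t "search langchain docs".toList 7 (by decide) (by decide) (by decide) h1).symm
  · by_cases h2 : PySem.Chars.startswith (PySem.Chars.lower t) "query langchain docs".toList = true
    · rw [show pvCoreA t = pvStripForA (PySem.Chars.strip (PySem.List.slice t (some (("query langchain docs".toList.length : Nat) : Int)) none)) from by
        simp only [pvCoreA, pvLoopA, h1, h2]; simp]
      exact (pv_case_eq t "query langchain docs".toList 6 (by decide) (by decide) (by decide) h2).symm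
    · by_cases h3 : PySem.Chars.startswith (PySem.Chars.lower t) "find in langchain docs".toList = true
      · rw [show pvCoreA t = pvStripForA (PySem.Chars.strip (PySem.List.slice t (some (("find in langchain docs".toList.length : Nat) : Int)) none)) from by
          simp only [pvCoreA, pvLoopA, h1, h2, h3]; simp]
        exact (pv_case_eq t "find in langchain docs".toList 8 (by decide) (by decide) (by decide) h3).symm
      · -- fall-through: A's fallback is literally B's computation
        rw [show pvCoreA t = (if PySem.Chars.isIn pvMarker (PySem.Chars.lower t) then
              pvStripForA (PySem.Chars.strip (PySem.List.slice t
                (some (PySem.Chars.find (PySem.Chars.lower t) pvMarker + (pvMarker.length : Int))) none))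
            else []) from by simp only [pvCoreA, pvLoopA, h1, h2, h3]; simp]
        by_cases hin : PySem.Chars.isIn pvMarker (PySem.Chars.lower t) = true
        · have hinf := (PySem.Chars.isIn_iff_infix _ _).mp hin
          have hne : PySem.Chars.find (PySem.Chars.lower t) pvMarker ≠ -1 :=
            (PySem.Chars.find_ne_neg_one_iff _ _).mpr hinf
          rw [pvCoreB, if_neg hne, if_pos hin, pvStripFor_eq]
        · have hninf : ¬ pvMarker <:+: PySem.Chars.lower t := fun hc =>
            hin ((PySem.Chars.isIn_iff_infix _ _).mpr hc)
          have heq : PySem.Chars.find (PySem.Chars.lower t) pvMarker = -1 :=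
            (PySem.Chars.find_eq_neg_one_iff _ _).mpr hninf
          rw [pvCoreB, if_pos heq, if_neg hin]
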